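-- pv_equiv track=rewrite | github.com/rkechols/KattisAssorted | solved/zamka.py | sum_digits_matches
-- ===== SOURCE A (Python) =====
-- def sum_digits_matches(to_sum: int, val: int) -> bool:
-- 	remaining = to_sum
-- 	total = 0
-- 	while remaining > 0:
-- 		total += (remaining % 10)
-- 		remaining = (remaining // 10)
-- 		if total > val:
-- 			return False
-- 	return total == val
-- ===== SOURCE B (Python) =====
-- def sum_digits_matches(to_sum: int, val: int) -> bool:
--     total = sum(int(c) for c in str(to_sum)) if to_sum > 0 else 0
--     return total == val
-- ===== Notes on version B (the rewrite author's own statement) =====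
-- stated objective: simpler
-- what changed: B computes the digit sum in one expression by iterating over the decimal string representation (int(c) for c in str(to_sum)) and compares once, instead of A's arithmetic mod/div loop with mutable state and an early-exit branch.
import Mathlib
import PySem

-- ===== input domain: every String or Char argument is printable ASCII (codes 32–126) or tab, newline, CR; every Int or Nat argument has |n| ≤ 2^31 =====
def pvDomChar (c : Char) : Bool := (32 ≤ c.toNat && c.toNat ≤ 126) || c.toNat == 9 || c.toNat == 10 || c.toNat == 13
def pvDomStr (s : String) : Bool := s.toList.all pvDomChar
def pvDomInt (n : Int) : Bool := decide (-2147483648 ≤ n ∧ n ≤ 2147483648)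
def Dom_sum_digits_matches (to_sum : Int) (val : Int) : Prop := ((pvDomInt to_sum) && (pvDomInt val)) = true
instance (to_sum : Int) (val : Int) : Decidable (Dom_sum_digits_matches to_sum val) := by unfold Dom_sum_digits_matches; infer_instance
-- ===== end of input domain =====

-- B replaces A's mutable mod/div loop with an early exit by a single comparison of the
-- decimal-string digit sum against val (objective: simpler).


-- ===== PORT A =====
-- the while loop of A: state (remaining, total), early return False when total > val
def sumLoopA (remaining total val : Int) : Bool :=
  if _h : remaining > 0 then
    let total' := total + PySem.Int.mod remaining 10
    let remaining' := PySem.Int.floordiv remaining 10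
    if total' > val then false
    else sumLoopA remaining' total' val
  else decide (total = val)
termination_by remaining.toNat
decreasing_by
  have h10 : PySem.Int.floordiv remaining 10 = remaining / 10 := by
    simp [PySem.Int.floordiv, Int.fdiv_eq_ediv]
  simp only [h10]
  omega

def sum_digits_matches (to_sum : Int) (val : Int) : Bool :=
  sumLoopA to_sum 0 val

-- ===== PORT B =====
-- int(c) hand-ported as the digit value of c; exact here because str(to_sum) for
-- to_sum > 0 consists only of the characters '0'..'9'.
def digitVal (c : Char) : Int := (c.toNat : Int) - 48

def sum_digits_matches_alt (to_sum : Int) (val : Int) : Bool :=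
  let total : Int :=
    if to_sum > 0 then ((PySem.Int.toStr to_sum).toList.map digitVal).sum else 0
  decide (total = val)

-- ===== PRECONDITION & SPEC =====
def Spec_sum_digits_matches (to_sum : Int) (val : Int) (out : Bool) : Prop := out = sum_digits_matches_alt to_sum val
instance (to_sum : Int) (val : Int) (out : Bool) : Decidable (Spec_sum_digits_matches to_sum val out) := by unfold Spec_sum_digits_matches; infer_instance

-- ===== CLAIM (what is proved, stated in full; the proofs are below) =====
def Claim_equal_sum_digits_matches : Prop := ∀ (to_sum : Int) (val : Int), Dom_sum_digits_matches to_sum val → Spec_sum_digits_matches to_sum val (sum_digits_matches to_sum val)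

-- ===== LEMMAS AND PROOFS =====

theorem digitVal_digitChar {m : Nat} (h : m < 10) : digitVal (Nat.digitChar m) = m := by
  interval_cases m <;> decide

theorem toDigitsCore_sum (f : Nat) : ∀ (n : Nat) (l : List Char), n < 10 ^ f →
    ((Nat.toDigitsCore 10 f n l).map digitVal).sum
      = ((Nat.digits 10 n).sum : Int) + (l.map digitVal).sum := by
  induction f with
  | zero =>
    intro n l hn
    interval_cases n
    simp [Nat.toDigitsCore]
  | succ f ih =>
    intro n l hn
    rw [Nat.toDigitsCore]
    by_cases h0 : n / 10 = 0
    · have hlt : n < 10 := by omega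
      simp only [h0, if_true]
      rcases Nat.eq_zero_or_pos n with hz | hp
      · subst hz; simp [digitVal_digitChar]
      · rw [Nat.digits_def' (by norm_num : 1 < 10) hp, h0]
        simp [digitVal_digitChar (Nat.mod_lt n (by norm_num) : n % 10 < 10)]
    · simp only [h0, if_false]
      have hp : 0 < n := by
        rcases Nat.eq_zero_or_pos n with hz | hp
        · subst hz; simp at h0
        · exact hp
      have hsub : n / 10 < 10 ^ f := by
        have : n < 10 ^ f * 10 := by
          have := hn; rw [pow_succ] at this; omega
        omega
      rw [ih (n / 10) (Nat.digitChar (n % 10) :: l) hsub]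
      rw [Nat.digits_def' (by norm_num : 1 < 10) hp]
      simp [digitVal_digitChar (Nat.mod_lt n (by norm_num) : n % 10 < 10)]
      ring

theorem toDigits_sum (n : Nat) :
    ((Nat.toDigits 10 n).map digitVal).sum = ((Nat.digits 10 n).sum : Int) := by
  have hlt : n < 10 ^ (n + 1) := by
    calc n < 10 ^ n := Nat.lt_pow_self (by norm_num)
    _ ≤ 10 ^ (n + 1) := Nat.pow_le_pow_right (by norm_num) (by omega)
  rw [Nat.toDigits, toDigitsCore_sum (n + 1) n [] hlt]
  simp

-- A's loop computes: does total plus the remaining digit sum equal val (the early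
-- exit only short-circuits a comparison that would fail anyway).
theorem sumLoopA_eq (n : Nat) : ∀ (total val : Int),
    sumLoopA (n : Int) total val = decide (total + ((Nat.digits 10 n).sum : Int) = val) := by
  induction n using Nat.strong_induction_on with
  | _ n ih =>
    intro total val
    rw [sumLoopA]
    by_cases hp : (n : Int) > 0
    · have hn : 0 < n := by exact_mod_cast hp
      simp only [hp, dite_true]
      have hmod : PySem.Int.mod (n : Int) 10 = ((n % 10 : Nat) : Int) := by
        simp [PySem.Int.mod, Int.fmod_eq_emod]
      have hdiv : PySem.Int.floordiv (n : Int) 10 = ((n / 10 : Nat) : Int) := by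
        simp [PySem.Int.floordiv, Int.fdiv_eq_ediv]
      have hds : ((Nat.digits 10 n).sum : Int)
          = ((n % 10 : Nat) : Int) + ((Nat.digits 10 (n / 10)).sum : Int) := by
        rw [Nat.digits_def' (by norm_num : 1 < 10) hn]
        push_cast [List.sum_cons]
        simp
      rw [hmod, hdiv]
      by_cases hgt : total + ((n % 10 : Nat) : Int) > val
      · simp only [hgt, if_true]
        have hnn : (0 : Int) ≤ ((Nat.digits 10 (n / 10)).sum : Int) := by positivity
        rw [hds]
        symm
        simp only [decide_eq_false_iff_not]
        omega
      · simp only [hgt, if_false]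
        rw [ih (n / 10) (Nat.div_lt_self hn (by norm_num)) _ val, hds]
        congr 1
        · simp only [eq_iff_iff]
          constructor <;> intro h <;> omega
    · simp only [hp, dite_false]
      have hz : n = 0 := by omega
      subst hz
      simp

-- ===== VERDICT (by name: the statement is the Claim_ definition above) =====
theorem sum_digits_matches_spec : Claim_equal_sum_digits_matches := by
  intro to_sum val _
  unfold Spec_sum_digits_matches sum_digits_matches sum_digits_matches_alt
  by_cases hp : to_sum > 0
  · obtain ⟨m, hm⟩ : ∃ m : Nat, to_sum = (m : Int) := ⟨to_sum.toNat, by omega⟩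
    subst hm
    simp only [hp, if_true]
    have hchars : (PySem.Int.toStr (m : Int)).toList = Nat.toDigits 10 m := by
      rw [PySem.Int.toList_toStr]
      simp [PySem.Int.toChars, show ¬ ((m : Int) < 0) by omega]
    have hm' : ((m : Int)).toNat = m := by omega
    rw [show ((m : Int)) = ((((m : Int)).toNat : Nat) : Int) by omega, hm',
      sumLoopA_eq m 0 val, hchars, toDigits_sum]
    simp
  · have h0 : to_sum.toNat = 0 := by omega
    have hc : to_sum = ((to_sum.toNat : Nat) : Int) ∨ to_sum < 0 := by omega
    simp only [hp, if_false]
    rcases hc with hc | hc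
    · rw [hc, sumLoopA_eq]
      simp [h0]
    · rw [sumLoopA]
      simp [hp]
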